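-- pv_equiv track=rewrite | github.com/guyleaf/python | 作業32/test32.py | check
-- ===== SOURCE A (Python) =====
-- def check(rank):
--     for i in range(1, 3):
--         if(rank.count(str(i))//2==4):
--             rank.replace(str(i), '', 4)
--     rank = rank.replace('3', '', (rank.count('3')//2)*2)
--     num = min(rank.count('1'), rank.count('2'))
--     rank = rank.replace('1', '', num)
--     rank = rank.replace('2', '', num)
--     return rank
-- ===== SOURCE B (Python) =====
-- def check(rank):
--     # single pass with three remaining-removal counters instead of chained str.replace calls
--     r3 = (rank.count('3') // 2) * 2
--     num = min(rank.count('1'), rank.count('2'))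
--     r1 = r2 = num
--     out = []
--     for ch in rank:
--         if ch == '3' and r3 > 0:
--             r3 -= 1
--         elif ch == '1' and r1 > 0:
--             r1 -= 1
--         elif ch == '2' and r2 > 0:
--             r2 -= 1
--         else:
--             out.append(ch)
--     return ''.join(out)
-- ===== Notes on version B (the rewrite author's own statement) =====
-- stated objective: alternative
-- what changed: A removes digits via three chained str.replace passes (plus a dead loop whose replace result is discarded); B computes the removal quotas once and does a single left-to-right pass over the characters with three remaining-removal counters.
import Mathlib
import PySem

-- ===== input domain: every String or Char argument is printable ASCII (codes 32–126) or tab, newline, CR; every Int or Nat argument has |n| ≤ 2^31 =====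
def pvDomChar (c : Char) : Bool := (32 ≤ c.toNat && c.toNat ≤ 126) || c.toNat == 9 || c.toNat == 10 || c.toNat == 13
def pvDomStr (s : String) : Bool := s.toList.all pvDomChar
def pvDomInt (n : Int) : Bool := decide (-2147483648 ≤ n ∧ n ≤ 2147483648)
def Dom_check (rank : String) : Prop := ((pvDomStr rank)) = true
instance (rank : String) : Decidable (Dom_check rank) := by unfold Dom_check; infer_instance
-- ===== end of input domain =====

-- B replaces A's chained count/replace passes by one left-to-right pass over the characters
-- maintaining three remaining-removal counters (objective: alternative decomposition, same cost).

-- ===== PORT A =====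
-- hand port of s.replace(c, '', k) for a SINGLE character c and empty replacement:
-- remove the k leftmost occurrences of c (exact for these calls: old is one char, new is '').
def removeCharN : List Char → Char → Nat → List Char
  | [], _, _ => []
  | x :: xs, c, k =>
    if x = c ∧ k ≠ 0 then removeCharN xs c (k - 1) else x :: removeCharN xs c k

def check (rank : String) : String :=
  let cs := rank.toList
  -- for i in range(1,3): if count//2==4: rank.replace(str(i),'',4)  — the replace's result is
  -- discarded by the Python, so the loop leaves the string unchanged; str(i) for i∈{1,2} is the
  -- digit character (hand port, exact on this range); '//' on the nonnegative count is Nat '/'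
  let cs := (PySem.List.pyRange 1 3 1).foldl (fun acc i =>
      if (List.count (Char.ofNat (48 + i.toNat)) acc) / 2 == 4 then
        let _ := removeCharN acc (Char.ofNat (48 + i.toNat)) 4
        acc
      else acc) cs
  -- rank = rank.replace('3', '', (rank.count('3')//2)*2); str.count of a single char is List.count
  let cs := removeCharN cs '3' (List.count '3' cs / 2 * 2)
  let num := min (List.count '1' cs) (List.count '2' cs)
  let cs := removeCharN cs '1' num
  let cs := removeCharN cs '2' num
  String.ofList cs

-- ===== PORT B =====
-- one pass with three remaining-removal counters (r1 for '1', r2 for '2', r3 for '3')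
def altGo : List Char → Nat → Nat → Nat → List Char
  | [], _, _, _ => []
  | x :: xs, r1, r2, r3 =>
    if x = '3' ∧ r3 ≠ 0 then altGo xs r1 r2 (r3 - 1)
    else if x = '1' ∧ r1 ≠ 0 then altGo xs (r1 - 1) r2 r3
    else if x = '2' ∧ r2 ≠ 0 then altGo xs r1 (r2 - 1) r3
    else x :: altGo xs r1 r2 r3

def check_alt (rank : String) : String :=
  let cs := rank.toList
  let q3 := List.count '3' cs / 2 * 2
  let num := min (List.count '1' cs) (List.count '2' cs)
  String.ofList (altGo cs num num q3)

-- ===== PRECONDITION & SPEC =====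
def Spec_check (rank : String) (out : String) : Prop := out = check_alt rank
instance (rank : String) (out : String) : Decidable (Spec_check rank out) := by unfold Spec_check; infer_instance

-- ===== CLAIM (what is proved, stated in full; the proofs are below) =====
def Claim_equal_check : Prop := ∀ (rank : String), Dom_check rank → Spec_check rank (check rank)

-- ===== LEMMAS AND PROOFS =====

-- A's first loop never changes the accumulator
lemma dead_loop (l : List Int) (cs : List Char) :
    l.foldl (fun acc i =>
      if (List.count (Char.ofNat (48 + i.toNat)) acc) / 2 == 4 then
        let _ := removeCharN acc (Char.ofNat (48 + i.toNat)) 4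
        acc
      else acc) cs = cs := by
  induction l generalizing cs with
  | nil => rfl
  | cons x xs ih => simp only [List.foldl_cons]; split <;> exact ih cs

-- removing occurrences of c does not change the count of a different character d
lemma count_removeCharN (xs : List Char) (c d : Char) (k : Nat) (h : d ≠ c) :
    List.count d (removeCharN xs c k) = List.count d xs := by
  induction xs generalizing k with
  | nil => rfl
  | cons x xs ih =>
    simp only [removeCharN]
    split
    · rename_i hx
      rw [ih]
      simp [hx.1, Ne.symm h]
    · simp [List.count_cons, ih]

-- B's single pass equals A's three successive removal passes
lemma altGo_eq (xs : List Char) (r1 r2 r3 : Nat) :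
    altGo xs r1 r2 r3 =
      removeCharN (removeCharN (removeCharN xs '3' r3) '1' r1) '2' r2 := by
  induction xs generalizing r1 r2 r3 with
  | nil => rfl
  | cons x xs ih =>
    by_cases h3 : x = '3' ∧ r3 ≠ 0
    · simp only [altGo, removeCharN, if_pos h3, ih]
    · by_cases h1 : x = '1' ∧ r1 ≠ 0
      · simp only [altGo, removeCharN, if_neg h3, if_pos h1, ih]
      · by_cases h2 : x = '2' ∧ r2 ≠ 0
        · simp only [altGo, removeCharN, if_neg h3, if_neg h1, if_pos h2, ih]
        · simp only [altGo, removeCharN, if_neg h3, if_neg h1, if_neg h2, ih]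

-- ===== VERDICT (by name: the statement is the Claim_ definition above) =====
theorem check_spec : Claim_equal_check := by
  intro rank _
  show check rank = check_alt rank
  unfold check check_alt
  simp only [dead_loop]
  rw [altGo_eq,
    count_removeCharN _ _ _ _ (by decide),
    count_removeCharN _ _ _ _ (by decide)]
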